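-- pv_equiv track=rewrite | github.com/nesfit/RuleForge | mdbscan_rule_generator.py | count_duplicate_last
-- ===== SOURCE A (Python) =====
-- def count_duplicate_last(password):
--     count = 0
--     for i in range(len(password) - 2, -1, -1):
--         if password[i] == password[(len(password) - 1)]:
--             count += 1
--         else:
--             break
--     return count
-- ===== SOURCE B (Python) =====
-- def count_duplicate_last(password):
--     if not password:
--         return 0
--     last = password[-1]
--     return len(password) - len(password.rstrip(last)) - 1
-- ===== Notes on version B (the rewrite author's own statement) =====
-- stated objective: simpler
-- what changed: Replaces the explicit reverse index scan with break by a closed-form computation: the trailing-run length is len(password) - len(password.rstrip(last)) - 1.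
import Mathlib
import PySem

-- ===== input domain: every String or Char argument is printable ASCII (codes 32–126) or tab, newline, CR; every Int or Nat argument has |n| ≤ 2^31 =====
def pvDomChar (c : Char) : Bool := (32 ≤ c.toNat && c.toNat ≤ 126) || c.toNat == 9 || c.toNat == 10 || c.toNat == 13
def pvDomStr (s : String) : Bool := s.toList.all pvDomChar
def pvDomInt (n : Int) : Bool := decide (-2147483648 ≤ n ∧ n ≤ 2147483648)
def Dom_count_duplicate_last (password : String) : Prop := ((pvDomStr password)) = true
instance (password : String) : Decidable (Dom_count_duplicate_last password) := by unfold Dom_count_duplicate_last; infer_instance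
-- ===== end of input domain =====

-- B replaces A's reverse index-scan-with-break by arithmetic on rstrip'd lengths (objective: simpler).

-- ===== PORT A =====
-- the 'for i in range(len(password)-2, -1, -1): … else break' loop, consuming its index list
def pvScanA (cs : List Char) : List Int → Int → Int
  | [], count => count
  | i :: is, count =>
      if PySem.List.pyGet? cs i == PySem.List.pyGet? cs ((cs.length : Int) - 1) then
        pvScanA cs is (count + 1)
      else count

def count_duplicate_last (password : String) : Int :=
  pvScanA password.toList
    (PySem.List.pyRange ((password.toList.length : Int) - 2) (-1) (-1)) 0

-- ===== PORT B =====
-- hand port of str.rstrip(c) for a single-character argument (PySem has no rstrip-with-chars):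
-- exact, since Python removes the maximal trailing run of characters from the given set {c}
def pvRstripChar (cs : List Char) (c : Char) : List Char :=
  (cs.reverse.dropWhile (· == c)).reverse

def count_duplicate_last_alt (password : String) : Int :=
  match password.toList with
  | [] => 0
  | cs@(_ :: _) =>
      -- last := password[-1]; the emptiness guard makes it in range
      (cs.length : Int) - ((pvRstripChar cs cs.getLast!).length : Int) - 1

-- ===== PRECONDITION & SPEC =====
def Spec_count_duplicate_last (password : String) (out : Int) : Prop := out = count_duplicate_last_alt password
instance (password : String) (out : Int) : Decidable (Spec_count_duplicate_last password out) := by unfold Spec_count_duplicate_last; infer_instance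

-- ===== CLAIM (what is proved, stated in full; the proofs are below) =====
def Claim_equal_count_duplicate_last : Prop := ∀ (password : String), Dom_count_duplicate_last password → Spec_count_duplicate_last password (count_duplicate_last password)

-- ===== LEMMAS AND PROOFS =====

-- A's scan over indices k-1 … 0 counts the equal-to-last prefix of (cs.take k).reverse
theorem pvScanA_eq (cs : List Char) (last : Char)
    (hlast : PySem.List.pyGet? cs ((cs.length : Int) - 1) = some last) :
    ∀ (k : Nat) (count : Int), k < cs.length →
      pvScanA cs (PySem.List.pyRange ((k : Int) - 1) (-1) (-1)) count
        = count + (((cs.take k).reverse.takeWhile (· == last)).length : Int) := by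
  intro k
  induction k with
  | zero =>
      intro count _
      rw [PySem.List.pyRange_neg_one_eq_nil (by omega)]
      simp [pvScanA]
  | succ k ih =>
      intro count hk
      have hk1 : ((k + 1 : Nat) : Int) - 1 = (k : Int) := by push_cast; ring
      rw [hk1, PySem.List.pyRange_neg_one_cons (by omega)]
      have hget : PySem.List.pyGet? cs (k : Int) = some cs[k] := by
        simpa using PySem.List.pyGet?_natCast cs k (by omega)
      have htake : (cs.take (k+1)).reverse = cs[k] :: (cs.take k).reverse := by
        rw [List.take_add_one]
        simp [List.getElem?_eq_getElem (by omega : k < cs.length)]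
      rw [pvScanA, hget, hlast, htake]
      by_cases h : cs[k] = last
      · simp only [h, beq_self_eq_true, if_pos, Option.some.injEq, List.takeWhile]
        rw [ih (count + 1) (by omega)]
        simp [h]
        omega
      · have hb : (cs[k] == last) = false := by simp [h]
        have hs : (some cs[k] == some last) = false := by simp [h]
        rw [hs]
        simp [List.takeWhile, hb]

theorem pvMain (c : Char) (cs' : List Char) :
    pvScanA (c :: cs') (PySem.List.pyRange (((c :: cs').length : Int) - 2) (-1) (-1)) 0
      = ((c :: cs').length : Int) - ((pvRstripChar (c :: cs') (c :: cs').getLast!).length : Int) - 1 := by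
  set cs : List Char := c :: cs' with hcsdef
  have hne : cs ≠ [] := by simp [hcsdef]
  set last := cs.getLast! with hlastdef
  have hlen : 0 < cs.length := by simp [hcsdef]
  have hgl : last = cs.getLast hne := by
    rw [hlastdef, List.getLast!_eq_getLast?_getD, List.getLast?_eq_some_getLast hne]
    rfl
  have hlast : PySem.List.pyGet? cs ((cs.length : Int) - 1) = some last := by
    have : ((cs.length : Int) - 1) = ((cs.length - 1 : Nat) : Int) := by omega
    rw [this]
    rw [show PySem.List.pyGet? cs ((cs.length - 1 : Nat) : Int)
          = cs[cs.length - 1]? from by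
        simpa using PySem.List.pyGet?_natCast cs (cs.length - 1) (by omega)]
    rw [List.getElem?_eq_getElem (by omega), hgl, List.getLast_eq_getElem]
  -- A's side: counts the equal-to-last prefix of cs.dropLast.reverse
  have hA : pvScanA cs (PySem.List.pyRange ((cs.length : Int) - 2) (-1) (-1)) 0
      = ((cs.dropLast.reverse.takeWhile (· == last)).length : Int) := by
    have h2 : ((cs.length : Int) - 2) = ((cs.length - 1 : Nat) : Int) - 1 := by omega
    rw [h2, pvScanA_eq cs last hlast (cs.length - 1) 0 (by omega)]
    rw [← List.dropLast_eq_take]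
    ring
  -- B's side: rstrip drops exactly that prefix from the reverse
  have hrev : cs.reverse = last :: cs.dropLast.reverse := by
    conv_lhs => rw [← List.dropLast_append_getLast hne]
    rw [List.reverse_append, hgl]
    rfl
  have hB : ((cs.length : Int) - ((pvRstripChar cs last).length : Int) - 1)
      = ((cs.dropLast.reverse.takeWhile (· == last)).length : Int) := by
    unfold pvRstripChar
    rw [hrev]
    simp only [List.dropWhile_cons, beq_self_eq_true, if_pos, List.length_reverse]
    have hsplit : (cs.dropLast.reverse.takeWhile (· == last)).length
        + (cs.dropLast.reverse.dropWhile (· == last)).length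
        = cs.dropLast.reverse.length := by
      rw [← List.length_append, List.takeWhile_append_dropWhile]
    have hdl : cs.dropLast.reverse.length = cs.length - 1 := by
      simp [List.length_dropLast]
    omega
  rw [hA, ← hB]

theorem count_duplicate_last_spec' (password : String) :
    count_duplicate_last password = count_duplicate_last_alt password := by
  unfold count_duplicate_last count_duplicate_last_alt
  cases hcs : password.toList with
  | nil => decide
  | cons c cs' => exact pvMain c cs'

-- ===== VERDICT (by name: the statement is the Claim_ definition above) =====
theorem count_duplicate_last_spec : Claim_equal_count_duplicate_last := by
  intro password _
  exact count_duplicate_last_spec' password
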